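-- pv_equiv track=rewrite | github.com/Slavster/vinyl-list | vinyl_bulk.py | split_top_candidate_urls
-- ===== SOURCE A (Python) =====
-- def split_top_candidate_urls(web: dict, limit=3):
--     """Discogs-first candidates + others (deduped, order preserved)."""
--     urls = [p.get("url") for p in web.get("pagesWithMatchingImages", []) if p.get("url")]
--     seen, dedup = set(), []
--     for u in urls:
--         if u not in seen:
--             dedup.append(u); seen.add(u)
--     discogs = [u for u in dedup if "discogs.com" in u.lower()][:limit]
--     other   = [u for u in dedup if "discogs.com" not in u.lower()][:limit]
--     return discogs, other
-- ===== SOURCE B (Python) =====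
-- def split_top_candidate_urls(web: dict, limit=3):
--     """Discogs-first candidates + others (deduped, order preserved).
--
--     Single fused pass: dedup and partition in one loop, cap at the end."""
--     seen = set()
--     discogs, other = [], []
--     for p in web.get("pagesWithMatchingImages", []):
--         u = p.get("url")
--         if not u or u in seen:
--             continue
--         seen.add(u)
--         (discogs if "discogs.com" in u.lower() else other).append(u)
--     return discogs[:limit], other[:limit]
-- ===== Notes on version B (the rewrite author's own statement) =====
-- stated objective: simpler
-- what changed: Fuses A's url-extraction pass, dedup loop and two filtering comprehensions into one traversal that partitions urls into the two lists as it dedups, capping each with [:limit] at the end.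
import Mathlib
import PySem

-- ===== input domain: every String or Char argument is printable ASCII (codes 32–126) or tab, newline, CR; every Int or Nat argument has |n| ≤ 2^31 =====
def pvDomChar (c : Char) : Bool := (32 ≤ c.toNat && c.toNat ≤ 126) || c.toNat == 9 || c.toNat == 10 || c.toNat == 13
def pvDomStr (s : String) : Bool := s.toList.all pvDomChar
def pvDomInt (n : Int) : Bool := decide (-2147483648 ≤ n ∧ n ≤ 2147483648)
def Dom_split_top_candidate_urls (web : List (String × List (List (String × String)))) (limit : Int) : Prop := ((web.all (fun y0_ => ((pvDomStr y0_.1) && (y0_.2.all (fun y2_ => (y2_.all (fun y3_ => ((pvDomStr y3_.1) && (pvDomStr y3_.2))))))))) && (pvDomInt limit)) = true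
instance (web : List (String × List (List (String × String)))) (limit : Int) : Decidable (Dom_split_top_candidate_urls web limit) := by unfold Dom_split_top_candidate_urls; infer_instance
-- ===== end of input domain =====

-- B fuses A's url-extraction pass, dedup loop and two filtering comprehensions into one
-- traversal that partitions as it dedups (objective: simpler, same asymptotic cost).


-- shared helper: the test `"discogs.com" in u.lower()`
def isDiscogs (u : String) : Bool := PySem.Str.isIn "discogs.com" (PySem.Str.lower u)

-- ===== PORT A =====
-- one step of A's comprehension  [p.get("url") for p in pages if p.get("url")]
def aUrlStep (acc : List String) (p : List (String × String)) : List String :=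
  match (PySem.Dict.mk p).get? "url" with
  | some u => if u ≠ "" then acc ++ [u] else acc
  | none => acc

-- one step of A's dedup loop  `if u not in seen: dedup.append(u); seen.add(u)`
def dedupStep (st : PySem.Set String × List String) (u : String) : PySem.Set String × List String :=
  if st.1.contains u then st else (st.1.add u, st.2 ++ [u])

def split_top_candidate_urls (web : List (String × List (List (String × String)))) (limit : Int) : List String × List String :=
  let pages := (PySem.Dict.mk web).getD "pagesWithMatchingImages" []
  let urls := pages.foldl aUrlStep []
  let st := urls.foldl dedupStep (PySem.Set.empty, [])
  (PySem.List.slice (st.2.filter (fun u => isDiscogs u)) none (some limit),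
   PySem.List.slice (st.2.filter (fun u => ¬ isDiscogs u)) none (some limit))

-- ===== PORT B =====
-- one iteration of B's fused loop over a page
def bPageStep (st : PySem.Set String × List String × List String) (p : List (String × String)) :
    PySem.Set String × List String × List String :=
  match (PySem.Dict.mk p).get? "url" with
  | none => st
  | some u =>
    if u = "" ∨ st.1.contains u then st
    else if isDiscogs u then (st.1.add u, st.2.1 ++ [u], st.2.2)
    else (st.1.add u, st.2.1, st.2.2 ++ [u])

def split_top_candidate_urls_alt (web : List (String × List (List (String × String)))) (limit : Int) : List String × List String :=
  let st := ((PySem.Dict.mk web).getD "pagesWithMatchingImages" []).foldl bPageStep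
    (PySem.Set.empty, [], [])
  (PySem.List.slice st.2.1 none (some limit), PySem.List.slice st.2.2 none (some limit))

-- ===== PRECONDITION & SPEC =====
def Spec_split_top_candidate_urls (web : List (String × List (List (String × String)))) (limit : Int) (out : List String × List String) : Prop := out = split_top_candidate_urls_alt web limit
instance (web : List (String × List (List (String × String)))) (limit : Int) (out : List String × List String) : Decidable (Spec_split_top_candidate_urls web limit out) := by unfold Spec_split_top_candidate_urls; infer_instance

-- ===== CLAIM (what is proved, stated in full; the proofs are below) =====
def Claim_equal_split_top_candidate_urls : Prop := ∀ (web : List (String × List (List (String × String)))) (limit : Int), Dom_split_top_candidate_urls web limit → Spec_split_top_candidate_urls web limit (split_top_candidate_urls web limit)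

-- ===== LEMMAS AND PROOFS =====

-- the url a page contributes, as A's comprehension filter sees it (proof-only helper)
def pageUrl (p : List (String × String)) : List String :=
  match (PySem.Dict.mk p).get? "url" with
  | some u => if u ≠ "" then [u] else []
  | none => []

-- B's fused per-url step (proof-only helper)
def fusedStep (st : PySem.Set String × List String × List String) (u : String) : PySem.Set String × List String × List String :=
  if u = "" ∨ st.1.contains u then st
  else if isDiscogs u then (st.1.add u, st.2.1 ++ [u], st.2.2)
  else (st.1.add u, st.2.1, st.2.2 ++ [u])

lemma fusedStep_skip (st : PySem.Set String × List String × List String) (u : String)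
    (h : u = "" ∨ st.1.contains u = true) : fusedStep st u = st := by
  unfold fusedStep; rw [if_pos h]

lemma fusedStep_go (st : PySem.Set String × List String × List String) (u : String)
    (h : ¬ (u = "" ∨ st.1.contains u = true)) :
    fusedStep st u = if isDiscogs u then (st.1.add u, st.2.1 ++ [u], st.2.2)
      else (st.1.add u, st.2.1, st.2.2 ++ [u]) := by
  unfold fusedStep; rw [if_neg h]

lemma dedupStep_skip (st : PySem.Set String × List String) (u : String)
    (h : st.1.contains u = true) : dedupStep st u = st := by
  unfold dedupStep; rw [if_pos h]

lemma dedupStep_go (st : PySem.Set String × List String) (u : String)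
    (h : ¬ st.1.contains u = true) : dedupStep st u = (st.1.add u, st.2 ++ [u]) := by
  unfold dedupStep; rw [if_neg h]

lemma aUrlStep_eq (acc : List String) (p : List (String × String)) :
    aUrlStep acc p = acc ++ pageUrl p := by
  unfold aUrlStep pageUrl
  cases h : (PySem.Dict.mk p).get? "url" with
  | none => simp
  | some u => by_cases hu : u = "" <;> simp [hu]

lemma bPageStep_eq (st : PySem.Set String × List String × List String) (p : List (String × String)) :
    bPageStep st p = (pageUrl p).foldl fusedStep st := by
  unfold bPageStep pageUrl
  cases h : (PySem.Dict.mk p).get? "url" with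
  | none => rfl
  | some u =>
    by_cases hu : u = ""
    · subst hu
      dsimp only
      rw [if_pos (Or.inl rfl), if_neg (by simp : ¬ ¬ ("" = "")), List.foldl_nil]
    · dsimp only
      rw [if_pos hu, List.foldl_cons, List.foldl_nil]
      rfl

lemma urls_eq_flatMap (pages : List (List (String × String))) (acc : List String) :
    pages.foldl aUrlStep acc = acc ++ pages.flatMap pageUrl := by
  induction pages generalizing acc with
  | nil => simp
  | cons p rest ih => rw [List.foldl_cons, aUrlStep_eq, List.flatMap_cons, ih, List.append_assoc]

-- B's fold over pages = the fused step folded over A's extracted urls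
lemma b_fold_eq (pages : List (List (String × String)))
    (st : PySem.Set String × List String × List String) :
    pages.foldl bPageStep st = (pages.flatMap pageUrl).foldl fusedStep st := by
  induction pages generalizing st with
  | nil => rfl
  | cons p rest ih =>
    rw [List.foldl_cons, bPageStep_eq, List.flatMap_cons, List.foldl_append, ih]

-- fused fold = dedup fold followed by the two filters, for non-empty urls
lemma fused_eq_dedup_filter (urls : List String) (h : ∀ u ∈ urls, u ≠ "")
    (seen : PySem.Set String) (dd : List String) :
    urls.foldl fusedStep (seen, dd.filter (fun u => isDiscogs u), dd.filter (fun u => ¬ isDiscogs u)) =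
      ((urls.foldl dedupStep (seen, dd)).1,
       (urls.foldl dedupStep (seen, dd)).2.filter (fun u => isDiscogs u),
       (urls.foldl dedupStep (seen, dd)).2.filter (fun u => ¬ isDiscogs u)) := by
  induction urls generalizing seen dd with
  | nil => rfl
  | cons u rest ih =>
    have hu : u ≠ "" := h u (by simp)
    have hrest : ∀ v ∈ rest, v ≠ "" := fun v hv => h v (by simp [hv])
    rw [List.foldl_cons, List.foldl_cons]
    by_cases hc : seen.contains u = true
    · rw [fusedStep_skip _ _ (Or.inr hc), dedupStep_skip _ _ hc]
      exact ih hrest seen dd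
    · rw [fusedStep_go _ _ (by rintro (h' | h') <;> [exact hu h'; exact hc h']),
          dedupStep_go _ _ hc]
      by_cases hd : isDiscogs u
      · rw [if_pos hd]
        simpa [List.filter_append, hd] using ih hrest (seen.add u) (dd ++ [u])
      · rw [if_neg hd]
        simpa [List.filter_append, hd] using ih hrest (seen.add u) (dd ++ [u])

-- ===== VERDICT (by name: the statement is the Claim_ definition above) =====
theorem split_top_candidate_urls_spec : Claim_equal_split_top_candidate_urls := by
  intro web limit _
  unfold Spec_split_top_candidate_urls split_top_candidate_urls split_top_candidate_urls_alt
  have hne : ∀ u ∈ (((PySem.Dict.mk web).getD "pagesWithMatchingImages" []).flatMap pageUrl), u ≠ "" := by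
    intro u hu
    rcases List.mem_flatMap.1 hu with ⟨p, _, hm⟩
    unfold pageUrl at hm
    cases h : (PySem.Dict.mk p).get? "url" with
    | none => simp [h] at hm
    | some v =>
      rw [h] at hm
      by_cases hv : v = "" <;> simp [hv] at hm
      exact hm ▸ hv
  have hf := fused_eq_dedup_filter _ hne PySem.Set.empty []
  simp only [List.filter_nil] at hf
  dsimp only
  rw [urls_eq_flatMap, List.nil_append, b_fold_eq, hf]
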